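-- pv_equiv track=rewrite | github.com/Ronaldlicy/Python-Exercises | PythonExercise46.py | validate_swaps
-- ===== SOURCE A (Python) =====
-- def validate_swaps(arraystrings, originalstring):
--
--     validate=[]
--
--     for s in arraystrings:
--
--         original=[i for i in originalstring]
--         strings=[j for j in s]
--
--         if len(strings)!=len(original):
--             validate.append(False)
--
--         elif sorted(strings)!=sorted(original):
--             validate.append(False)
--
--         else:
--             check=[0 if strings[c]==original[c] else 1 for c in range(len(strings))]
--
--             if sum(check)>2:
--                 validate.append(False)
--             else:
--                 validate.append(True)
--
--     return validate
-- ===== SOURCE B (Python) =====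
-- def _check(s, originalstring, freq, n):
--     if len(s) != n:
--         return False
--     f = dict(freq)
--     diff = 0
--     for a, b in zip(s, originalstring):
--         f[a] = f.get(a, 0) - 1
--         if a != b:
--             diff += 1
--     return diff <= 2 and all(v == 0 for v in f.values())
--
--
-- def validate_swaps(arraystrings, originalstring):
--     freq = {}
--     for ch in originalstring:
--         freq[ch] = freq.get(ch, 0) + 1
--     n = len(originalstring)
--     return [_check(s, originalstring, freq, n) for s in arraystrings]
-- ===== Notes on version B (the rewrite author's own statement) =====
-- stated objective: faster
-- what changed: Replaces the per-string sort-both-and-compare anagram test and the separate indexed mismatch list with a frequency table of the original built once, then one paired pass per candidate that simultaneously decrements the table and counts mismatching positions.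
import Mathlib
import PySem

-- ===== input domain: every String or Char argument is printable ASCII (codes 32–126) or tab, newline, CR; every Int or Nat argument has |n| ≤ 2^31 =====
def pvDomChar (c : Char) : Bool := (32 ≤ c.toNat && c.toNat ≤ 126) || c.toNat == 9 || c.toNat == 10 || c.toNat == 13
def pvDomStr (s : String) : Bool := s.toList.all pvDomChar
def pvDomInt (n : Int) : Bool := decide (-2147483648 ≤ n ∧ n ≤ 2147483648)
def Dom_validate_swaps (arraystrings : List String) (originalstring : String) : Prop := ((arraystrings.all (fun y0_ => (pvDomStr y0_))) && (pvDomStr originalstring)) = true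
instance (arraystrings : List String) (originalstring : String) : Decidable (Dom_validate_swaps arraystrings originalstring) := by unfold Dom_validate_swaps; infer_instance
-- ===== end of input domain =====

-- B builds the original's character-frequency table once and, per candidate, does one paired pass
-- decrementing it and counting mismatching positions, instead of sorting both strings per candidate.


-- ===== PORT A =====
def validate_swaps (arraystrings : List String) (originalstring : String) : List Bool :=
  arraystrings.foldl (fun validate s =>
    let original := originalstring.toList
    let strings := s.toList
    if strings.length ≠ original.length then
      validate ++ [false]
    else if PySem.List.sorted strings (fun x => x) false ≠ PySem.List.sorted original (fun x => x) false then
      validate ++ [false]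
    else
      -- range(len(strings)) indexing: every index is in range, so getD is exact here
      let check := (List.range strings.length).map (fun c =>
        if strings.getD c ' ' = original.getD c ' ' then (0 : Int) else 1)
      if check.sum > 2 then validate ++ [false] else validate ++ [true]) []

-- ===== PORT B =====
def pvCheck (s : String) (originalstring : List Char) (freq : PySem.Dict Char Int) (n : Nat) : Bool :=
  let cs := s.toList
  if cs.length ≠ n then false
  else
    let st := (cs.zip originalstring).foldl
      (fun (p : PySem.Dict Char Int × Int) ab =>
        (p.1.modify ab.1 0 (fun v => v - 1), if ab.1 ≠ ab.2 then p.2 + 1 else p.2))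
      (freq, (0 : Int))
    decide (st.2 ≤ 2) && st.1.values.all (fun v => v == 0)

def validate_swaps_alt (arraystrings : List String) (originalstring : String) : List Bool :=
  let freq := originalstring.toList.foldl (fun d ch => d.modify ch 0 (fun v => v + 1)) PySem.Dict.empty
  let n := originalstring.toList.length
  arraystrings.map (fun s => pvCheck s originalstring.toList freq n)

-- ===== PRECONDITION & SPEC =====
def Spec_validate_swaps (arraystrings : List String) (originalstring : String) (out : List Bool) : Prop := out = validate_swaps_alt arraystrings originalstring
instance (arraystrings : List String) (originalstring : String) (out : List Bool) : Decidable (Spec_validate_swaps arraystrings originalstring out) := by unfold Spec_validate_swaps; infer_instance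

-- ===== CLAIM (what is proved, stated in full; the proofs are below) =====
def Claim_equal_validate_swaps : Prop := ∀ (arraystrings : List String) (originalstring : String), Dom_validate_swaps arraystrings originalstring → Spec_validate_swaps arraystrings originalstring (validate_swaps arraystrings originalstring)

-- ===== LEMMAS AND PROOFS =====

theorem pv_fold_fst (l : List (Char × Char)) (d : PySem.Dict Char Int) (i : Int) :
    (l.foldl (fun (p : PySem.Dict Char Int × Int) ab =>
      (p.1.modify ab.1 0 (fun v => v - 1), if ab.1 ≠ ab.2 then p.2 + 1 else p.2)) (d, i)).1
    = l.foldl (fun d ab => d.modify ab.1 0 (fun v => v - 1)) d := by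
  induction l generalizing d i with
  | nil => rfl
  | cons ab t ih =>
      rw [List.foldl_cons, List.foldl_cons]
      exact ih _ _

theorem pv_fold_snd (l : List (Char × Char)) (d : PySem.Dict Char Int) (i : Int) :
    (l.foldl (fun (p : PySem.Dict Char Int × Int) ab =>
      (p.1.modify ab.1 0 (fun v => v - 1), if ab.1 ≠ ab.2 then p.2 + 1 else p.2)) (d, i)).2
    = i + (l.countP (fun ab => decide (ab.1 ≠ ab.2)) : Int) := by
  induction l generalizing d i with
  | nil => simp
  | cons ab t ih =>
      rw [List.foldl_cons, List.countP_cons]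
      by_cases h : ab.1 = ab.2 <;> simp only [h] <;> rw [ih] <;> simp [h] <;> push_cast <;> ring

theorem pv_fold_getD (l : List (Char × Char)) (d : PySem.Dict Char Int) (v : Char) :
    (l.foldl (fun d ab => d.modify ab.1 0 (fun v => v - 1)) d).getD v 0
    = d.getD v 0 - ((l.map Prod.fst).count v : Int) := by
  induction l generalizing d with
  | nil => simp
  | cons ab t ih =>
      rw [List.foldl_cons, ih, PySem.Dict.getD_modify, List.map_cons, List.count_cons]
      by_cases h : v = ab.1
      · simp only [h, if_true, beq_self_eq_true, ite_true, eq_self_iff_true]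
        push_cast
        ring
      · rw [if_neg h]
        have hb : (ab.1 == v) = false := by simpa using fun e => h e.symm
        rw [hb]
        push_cast
        ring

theorem pv_sum_eq_countP (xs ys : List Char) (h : xs.length = ys.length) :
    ((List.range xs.length).map (fun c =>
      if xs.getD c ' ' = ys.getD c ' ' then (0 : Int) else 1)).sum
    = ((xs.zip ys).countP (fun ab => decide (ab.1 ≠ ab.2)) : Int) := by
  induction xs generalizing ys with
  | nil => simp
  | cons x xt ih =>
      cases ys with
      | nil => simp at h
      | cons y yt =>
          simp only [List.length_cons] at h
          have hih := ih yt (by omega)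
          rw [List.length_cons, List.range_succ_eq_map]
          simp only [List.map_cons, List.map_map, List.sum_cons, List.zip_cons_cons,
            List.countP_cons, Function.comp_def, List.getD_cons_succ, List.getD_cons_zero]
          rw [hih]
          by_cases hxy : x = y <;> simp [hxy] <;> push_cast <;> ring

theorem pv_allzero_iff (f : PySem.Dict Char Int) (hnd : f.keys.Nodup) :
    (f.values.all (fun v => v == 0) = true) ↔ ∀ c, f.getD c 0 = 0 := by
  rw [PySem.Dict.values_eq_map_keys f hnd 0]
  simp only [List.all_eq_true, List.mem_map, beq_iff_eq]
  constructor
  · intro h c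
    by_cases hc : c ∈ f.keys
    · exact h _ ⟨c, hc, rfl⟩
    · rw [PySem.Dict.getD_of_not_contains]
      rw [← Bool.not_eq_true, PySem.Dict.contains_iff_mem_keys]
      exact hc
  · rintro h v ⟨c, _, rfl⟩
    exact h c

theorem pv_elem_eq (originalstring s : String) :
    (let original := originalstring.toList
     let strings := s.toList
     if strings.length ≠ original.length then
       false
     else if PySem.List.sorted strings (fun x => x) false ≠ PySem.List.sorted original (fun x => x) false then
       false
     else
       let check := (List.range strings.length).map (fun c =>
         if strings.getD c ' ' = original.getD c ' ' then (0 : Int) else 1)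
       if check.sum > 2 then false else true)
    = pvCheck s originalstring.toList
        (originalstring.toList.foldl (fun d ch => d.modify ch 0 (fun v => v + 1)) PySem.Dict.empty)
        originalstring.toList.length := by
  have hfreq : (originalstring.toList.foldl (fun d ch => d.modify ch 0 (fun v => v + 1)) PySem.Dict.empty)
      = PySem.Dict.counter originalstring.toList := (PySem.Dict.counter_eq_foldl _).symm
  rw [hfreq, pvCheck]
  show (if s.toList.length ≠ originalstring.toList.length then false else _) = _
  by_cases hlen : s.toList.length = originalstring.toList.length
  · rw [if_neg (not_not_intro hlen), if_neg (not_not_intro hlen)]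
    set F := ((s.toList.zip originalstring.toList).foldl
        (fun (p : PySem.Dict Char Int × Int) ab =>
          (p.1.modify ab.1 0 (fun v => v - 1), if ab.1 ≠ ab.2 then p.2 + 1 else p.2))
        (PySem.Dict.counter originalstring.toList, (0 : Int))) with hF
    show _ = (decide (F.2 ≤ 2) && F.1.values.all (fun v => v == 0))
    have hgetD : ∀ c, F.1.getD c 0
        = (originalstring.toList.count c : Int) - (s.toList.count c : Int) := by
      intro c
      rw [hF, pv_fold_fst, pv_fold_getD,
        List.map_fst_zip (le_of_eq hlen), PySem.Dict.getD_counter]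
    have hnd : F.1.keys.Nodup := by
      rw [hF, pv_fold_fst]
      exact PySem.Dict.nodup_keys_foldl_modify_key _ Prod.fst 0
        (fun _ _ _ => _ - 1) _ (PySem.Dict.nodup_keys_counter originalstring.toList)
    have hall : (F.1.values.all (fun v => v == 0) = true)
        ↔ s.toList.Perm originalstring.toList := by
      rw [pv_allzero_iff _ hnd, List.perm_iff_count]
      constructor
      · intro h c
        have h2 := h c
        rw [hgetD c] at h2
        omega
      · intro h c
        rw [hgetD c, h c]
        ring
    by_cases hperm : s.toList.Perm originalstring.toList
    · -- anagram: compare mismatch counts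
      have hv : F.1.values.all (fun v => v == 0) = true := hall.2 hperm
      have hsort : PySem.List.sorted s.toList (fun x => x) false
          = PySem.List.sorted originalstring.toList (fun x => x) false :=
        (PySem.List.sorted_id_eq_sorted_id_iff_perm s.toList originalstring.toList).2 hperm
      rw [if_neg (not_not_intro hsort)]
      show (if ((List.range s.toList.length).map (fun c =>
          if s.toList.getD c ' ' = originalstring.toList.getD c ' ' then (0 : Int) else 1)).sum > 2
        then false else true) = _
      rw [hv, Bool.and_true, pv_sum_eq_countP s.toList originalstring.toList hlen,
        hF, pv_fold_snd, zero_add]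
      by_cases hle : ((s.toList.zip originalstring.toList).countP
          (fun ab => decide (ab.1 ≠ ab.2)) : Int) ≤ 2
      · rw [if_neg (by omega), decide_eq_true hle]
      · rw [if_pos (by omega), decide_eq_false hle]
    · -- not an anagram: both sides false
      have hv : F.1.values.all (fun v => v == 0) = false := by
        cases hX : F.1.values.all (fun v => v == 0) with
        | false => rfl
        | true => exact absurd (hall.1 hX) hperm
      have hsort : PySem.List.sorted s.toList (fun x => x) false
          ≠ PySem.List.sorted originalstring.toList (fun x => x) false := by
        intro h
        exact hperm ((PySem.List.sorted_id_eq_sorted_id_iff_perm s.toList originalstring.toList).1 h)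
      rw [if_pos hsort, hv, Bool.and_false]
  · rw [if_pos hlen, if_pos hlen]

theorem pv_foldlA (originalstring : String) (l : List String) (acc : List Bool) :
    l.foldl (fun validate s =>
      let original := originalstring.toList
      let strings := s.toList
      if strings.length ≠ original.length then
        validate ++ [false]
      else if PySem.List.sorted strings (fun x => x) false ≠ PySem.List.sorted original (fun x => x) false then
        validate ++ [false]
      else
        let check := (List.range strings.length).map (fun c =>
          if strings.getD c ' ' = original.getD c ' ' then (0 : Int) else 1)
        if check.sum > 2 then validate ++ [false] else validate ++ [true]) acc
    = acc ++ l.map (fun s =>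
        let original := originalstring.toList
        let strings := s.toList
        if strings.length ≠ original.length then
          false
        else if PySem.List.sorted strings (fun x => x) false ≠ PySem.List.sorted original (fun x => x) false then
          false
        else
          let check := (List.range strings.length).map (fun c =>
            if strings.getD c ' ' = original.getD c ' ' then (0 : Int) else 1)
          if check.sum > 2 then false else true) := by
  induction l generalizing acc with
  | nil => simp
  | cons s t ih =>
      simp only [List.foldl_cons, List.map_cons, ih]
      split_ifs <;> simp

-- ===== VERDICT (by name: the statement is the Claim_ definition above) =====
theorem validate_swaps_spec : Claim_equal_validate_swaps := by
  intro arraystrings originalstring _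
  unfold Spec_validate_swaps validate_swaps validate_swaps_alt
  rw [pv_foldlA, List.nil_append]
  exact List.map_congr_left (fun s _ => pv_elem_eq originalstring s)
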